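-- pv_equiv track=rewrite | github.com/leike0813/ItascaUtilities | FLAC3D/customFunctions.py | generateFixityPhrase
-- ===== SOURCE A (Python) =====
-- def generateFixityPhrase(xvel=False, yvel=False, zvel=False, xrot=False, yrot=False, zrot=False, mode=None):
--     fixModeDict = {
--         'X_Symm_Zone': ('velocity-x', ),
--         'Y_Symm_Zone': ('velocity-y', ),
--         'Z_Symm_Zone': ('velocity-z', ),
--         'X_ASymm_Zone': ('velocity-y', 'velocity-z'),
--         'Y_ASymm_Zone': ('velocity-x', 'velocity-z'),
--         'Z_ASymm_Zone': ('velocity-x', 'velocity-y'),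
--         'X_Symm_Node': ('velocity-x', 'rotation-y', 'rotation-z'),
--         'Y_Symm_Node': ('velocity-y', 'rotation-x', 'rotation-z'),
--         'Z_Symm_Node': ('velocity-z', 'rotation-x', 'rotation-y'),
--         'X_ASymm_Node': ('velocity-y', 'velocity-z', 'rotation-x'),
--         'Y_ASymm_Node': ('velocity-x', 'velocity-z', 'rotation-y'),
--         'Z_ASymm_Node': ('velocity-x', 'velocity-y', 'rotation-z'),
--         'Encastre': ('velocity-x', 'velocity-y', 'velocity-z', 'rotation-x', 'rotation-y', 'rotation-z')
--     }
--
--     fixityElementList = []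
--     if not mode:
--         if xvel:
--             fixityElementList.append('velocity-x')
--         if yvel:
--             fixityElementList.append('velocity-y')
--         if zvel:
--             fixityElementList.append('velocity-z')
--         if xrot:
--             fixityElementList.append('rotation-x')
--         if yrot:
--             fixityElementList.append('rotation-y')
--         if zrot:
--             fixityElementList.append('rotation-z')
--     elif mode in fixModeDict.keys():
--         for fe in fixModeDict[mode]:
--             fixityElementList.append(fe)
--     else:
--         raise ValueError
--     fixityPhrase = ''
--     for fe in fixityElementList:
--         fixityPhrase += fe
--         fixityPhrase += ' '
--     fixityPhrase = fixityPhrase[:-1]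
--     return fixityPhrase
-- ===== SOURCE B (Python) =====
-- def generateFixityPhrase(xvel=False, yvel=False, zvel=False, xrot=False, yrot=False, zrot=False, mode=None):
--     # Encode the fixity set as a 6-bit integer mask (velocity-x = bit 0 ... rotation-z = bit 5),
--     # then decode the mask back to names with a divide-and-test loop.
--     NAMES = ('velocity-x', 'velocity-y', 'velocity-z', 'rotation-x', 'rotation-y', 'rotation-z')
--     MODE_MASK = {
--         'X_Symm_Zone': 0b000001, 'Y_Symm_Zone': 0b000010, 'Z_Symm_Zone': 0b000100,
--         'X_ASymm_Zone': 0b000110, 'Y_ASymm_Zone': 0b000101, 'Z_ASymm_Zone': 0b000011,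
--         'X_Symm_Node': 0b110001, 'Y_Symm_Node': 0b101010, 'Z_Symm_Node': 0b011100,
--         'X_ASymm_Node': 0b001110, 'Y_ASymm_Node': 0b010101, 'Z_ASymm_Node': 0b100011,
--         'Encastre': 0b111111,
--     }
--     if not mode:
--         mask = 0
--         for flag in (zrot, yrot, xrot, zvel, yvel, xvel):  # Horner: most significant bit first
--             mask = mask * 2 + (1 if flag else 0)
--     elif mode in MODE_MASK:
--         mask = MODE_MASK[mode]
--     else:
--         raise ValueError
--     parts = []
--     i = 0
--     m = mask
--     while m:
--         if m % 2 == 1: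
--             parts.append(NAMES[i])
--         m //= 2
--         i += 1
--     return ' '.join(parts)
-- ===== Notes on version B (the rewrite author's own statement) =====
-- stated objective: alternative
-- what changed: Re-encodes the fixity set as a 6-bit integer mask (flags packed by bit position; the mode dict stores masks instead of name tuples) and decodes the mask back to names with a shift-and-test while loop, instead of A's per-name conditionals / tuple copy and accumulate-then-trim string loop.
import Mathlib
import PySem

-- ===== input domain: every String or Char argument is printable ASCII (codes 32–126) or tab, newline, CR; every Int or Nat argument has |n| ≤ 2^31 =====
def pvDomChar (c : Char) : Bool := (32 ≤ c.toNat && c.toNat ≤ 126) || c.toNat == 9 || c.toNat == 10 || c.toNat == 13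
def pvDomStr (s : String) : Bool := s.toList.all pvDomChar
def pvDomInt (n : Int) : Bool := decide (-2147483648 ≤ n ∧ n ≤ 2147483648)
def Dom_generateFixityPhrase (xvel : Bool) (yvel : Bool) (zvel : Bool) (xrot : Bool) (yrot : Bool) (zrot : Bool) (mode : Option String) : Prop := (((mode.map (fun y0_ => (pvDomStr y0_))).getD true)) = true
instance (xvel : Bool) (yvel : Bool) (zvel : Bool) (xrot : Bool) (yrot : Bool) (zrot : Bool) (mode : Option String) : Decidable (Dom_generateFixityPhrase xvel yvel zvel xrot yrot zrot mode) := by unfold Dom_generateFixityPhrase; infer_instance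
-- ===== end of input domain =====

-- B re-encodes the fixity set as a 6-bit integer mask (flags packed by bit position; the
-- mode dict stores masks) decoded back to names by a divide-and-test loop, replacing A's
-- per-name conditionals / tuple copy and accumulate-then-trim string loop (objective:
-- alternative; same behaviour, A = B proved on all inputs where A returns).

-- ===== PORT A =====
-- the fixModeDict literal (insertion order preserved)
def fixModeDictA : PySem.Dict String (List String) := PySem.Dict.ofList
  [ ("X_Symm_Zone", ["velocity-x"])
  , ("Y_Symm_Zone", ["velocity-y"])
  , ("Z_Symm_Zone", ["velocity-z"])
  , ("X_ASymm_Zone", ["velocity-y", "velocity-z"])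
  , ("Y_ASymm_Zone", ["velocity-x", "velocity-z"])
  , ("Z_ASymm_Zone", ["velocity-x", "velocity-y"])
  , ("X_Symm_Node", ["velocity-x", "rotation-y", "rotation-z"])
  , ("Y_Symm_Node", ["velocity-y", "rotation-x", "rotation-z"])
  , ("Z_Symm_Node", ["velocity-z", "rotation-x", "rotation-y"])
  , ("X_ASymm_Node", ["velocity-y", "velocity-z", "rotation-x"])
  , ("Y_ASymm_Node", ["velocity-x", "velocity-z", "rotation-y"])
  , ("Z_ASymm_Node", ["velocity-x", "velocity-y", "rotation-z"])
  , ("Encastre", ["velocity-x", "velocity-y", "velocity-z", "rotation-x", "rotation-y", "rotation-z"]) ]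

-- Port of A. `not mode` is true for None and "". The `raise ValueError` branch is
-- modelled by `none` below and returns "" (outside Pre_, nothing is claimed there).
-- Strings are accumulated as List Char and `[:-1]` is PySem.List.slice — exact.
def generateFixityPhrase (xvel : Bool) (yvel : Bool) (zvel : Bool) (xrot : Bool) (yrot : Bool) (zrot : Bool) (mode : Option String) : String :=
  let fel? : Option (List String) :=
    if (match mode with | none => true | some m => m = "") then
      let l : List String := []
      let l := if xvel then l ++ ["velocity-x"] else l
      let l := if yvel then l ++ ["velocity-y"] else l
      let l := if zvel then l ++ ["velocity-z"] else l
      let l := if xrot then l ++ ["rotation-x"] else l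
      let l := if yrot then l ++ ["rotation-y"] else l
      let l := if zrot then l ++ ["rotation-z"] else l
      some l
    else
      let m := mode.getD ""
      if m ∈ fixModeDictA.keys then
        some (((fixModeDictA.get? m).getD []).foldl (fun acc fe => acc ++ [fe]) [])
      else
        none  -- raise ValueError
  match fel? with
  | none => ""
  | some fel =>
    let phrase : List Char := fel.foldl (fun s fe => s ++ fe.toList ++ [' ']) []
    String.ofList (PySem.List.slice phrase none (some (-1)))

-- ===== PORT B =====
-- B's NAMES tuple
def namesB : List String :=
  ["velocity-x", "velocity-y", "velocity-z", "rotation-x", "rotation-y", "rotation-z"]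

-- B's MODE_MASK dict (values are small nonnegative ints; Nat is exact here)
def modeMaskB : PySem.Dict String Nat := PySem.Dict.ofList
  [ ("X_Symm_Zone", 1), ("Y_Symm_Zone", 2), ("Z_Symm_Zone", 4)
  , ("X_ASymm_Zone", 6), ("Y_ASymm_Zone", 5), ("Z_ASymm_Zone", 3)
  , ("X_Symm_Node", 49), ("Y_Symm_Node", 42), ("Z_Symm_Node", 28)
  , ("X_ASymm_Node", 14), ("Y_ASymm_Node", 21), ("Z_ASymm_Node", 35)
  , ("Encastre", 63) ]

-- B's `while m:` decode loop (m //= 2 each step); the fuel argument only makes the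
-- loop total — m halves each iteration, so fuel = m suffices and is never exhausted.
def decodeMaskB : Nat → Nat → Nat → List String
  | 0, _, _ => []
  | fuel + 1, m, i =>
    if m = 0 then []
    else (if m % 2 = 1 then [namesB.getD i ""] else []) ++ decodeMaskB fuel (m / 2) (i + 1)

-- Port of B (Horner mask encode, divide-and-test decode, ' '.join).
def generateFixityPhrase_alt (xvel : Bool) (yvel : Bool) (zvel : Bool) (xrot : Bool) (yrot : Bool) (zrot : Bool) (mode : Option String) : String :=
  let mask? : Option Nat :=
    if (match mode with | none => true | some m => m = "") then
      some (([zrot, yrot, xrot, zvel, yvel, xvel].foldl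
        (fun mask flag => mask * 2 + (if flag then 1 else 0)) 0))
    else
      let m := mode.getD ""
      if modeMaskB.contains m then modeMaskB.get? m else none  -- raise ValueError
  match mask? with
  | none => ""
  | some mask => PySem.Str.join " " (decodeMaskB mask mask 0)

-- ===== PRECONDITION & SPEC =====
-- Pre_ excludes exactly the inputs on which A raises ValueError: a truthy mode that is
-- not a key of fixModeDict (B raises there too).
def Pre_generateFixityPhrase (xvel : Bool) (yvel : Bool) (zvel : Bool) (xrot : Bool) (yrot : Bool) (zrot : Bool) (mode : Option String) : Prop :=
  mode.getD "" = "" ∨ mode.getD "" ∈ ["X_Symm_Zone", "Y_Symm_Zone", "Z_Symm_Zone", "X_ASymm_Zone",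
      "Y_ASymm_Zone", "Z_ASymm_Zone", "X_Symm_Node", "Y_Symm_Node", "Z_Symm_Node",
      "X_ASymm_Node", "Y_ASymm_Node", "Z_ASymm_Node", "Encastre"]
instance (xvel : Bool) (yvel : Bool) (zvel : Bool) (xrot : Bool) (yrot : Bool) (zrot : Bool) (mode : Option String) : Decidable (Pre_generateFixityPhrase xvel yvel zvel xrot yrot zrot mode) := by unfold Pre_generateFixityPhrase; infer_instance

def pvWitness_generateFixityPhrase : Bool × Bool × Bool × Bool × Bool × Bool × Option String := (true, false, true, false, false, false, none)

def Spec_generateFixityPhrase (xvel : Bool) (yvel : Bool) (zvel : Bool) (xrot : Bool) (yrot : Bool) (zrot : Bool) (mode : Option String) (out : String) : Prop := out = generateFixityPhrase_alt xvel yvel zvel xrot yrot zrot mode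
instance (xvel : Bool) (yvel : Bool) (zvel : Bool) (xrot : Bool) (yrot : Bool) (zrot : Bool) (mode : Option String) (out : String) : Decidable (Spec_generateFixityPhrase xvel yvel zvel xrot yrot zrot mode out) := by unfold Spec_generateFixityPhrase; infer_instance

-- ===== CLAIM (what is proved, stated in full; the proofs are below) =====
def Claim_equal_generateFixityPhrase : Prop := ∀ (xvel : Bool) (yvel : Bool) (zvel : Bool) (xrot : Bool) (yrot : Bool) (zrot : Bool) (mode : Option String), Dom_generateFixityPhrase xvel yvel zvel xrot yrot zrot mode → Pre_generateFixityPhrase xvel yvel zvel xrot yrot zrot mode → Spec_generateFixityPhrase xvel yvel zvel xrot yrot zrot mode (generateFixityPhrase xvel yvel zvel xrot yrot zrot mode)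

-- ===== LEMMAS AND PROOFS =====

-- the flag branch: identical for mode = none and mode = some "" — check all 64 flag tuples
theorem flags_case_none : ∀ (a b c d e f : Bool),
    generateFixityPhrase a b c d e f none = generateFixityPhrase_alt a b c d e f none := by
  decide

theorem flags_case_empty : ∀ (a b c d e f : Bool),
    generateFixityPhrase a b c d e f (some "") = generateFixityPhrase_alt a b c d e f (some "") := by
  decide

-- a key mode ignores the flags: both ports take the dictionary branch, and decoding
-- the key's mask yields exactly the key's name tuple (the tuples are in bit order)
theorem key_case (m : String)
    (hm : m ∈ ["X_Symm_Zone", "Y_Symm_Zone", "Z_Symm_Zone", "X_ASymm_Zone",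
      "Y_ASymm_Zone", "Z_ASymm_Zone", "X_Symm_Node", "Y_Symm_Node", "Z_Symm_Node",
      "X_ASymm_Node", "Y_ASymm_Node", "Z_ASymm_Node", "Encastre"])
    (a b c d e f : Bool) :
    generateFixityPhrase a b c d e f (some m) = generateFixityPhrase_alt a b c d e f (some m) := by
  revert a b c d e f; fin_cases hm <;> decide

-- ===== VERDICT (by name: the statement is the Claim_ definition above) =====
theorem generateFixityPhrase_spec : Claim_equal_generateFixityPhrase := by
  intro a b c d e f mode _dom pre
  unfold Spec_generateFixityPhrase
  match mode with
  | none => exact flags_case_none a b c d e f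
  | some m =>
    rcases pre with h | h
    · simp only [Option.getD_some] at h; subst h; exact flags_case_empty a b c d e f
    · simp only [Option.getD_some] at h; exact key_case m h a b c d e f
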